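-- pv_equiv track=rewrite | github.com/move-geun/baekjoon_py | 프로그래머스/2/142085. 디펜스 게임/디펜스 게임.py | solution
-- ===== SOURCE A (Python) =====
-- import heapq
--
-- def solution(n, k, enemys):
--     answer = 0
--     q = []
--     for enemy in enemys:
--         if n >= enemy:
--             n -= enemy
--             heapq.heappush(q, -enemy)
--         else:
--             if k < 1:
--                 break
--             else:
--                 n -= enemy
--                 k -= 1
--                 heapq.heappush(q, -enemy)
--                 num = -heapq.heappop(q)
--                 n += num
--         answer += 1
--     return answer
-- ===== SOURCE B (Python) =====
-- def solution(n, k, enemys):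
--     # Staged decomposition: while shields remain, run a pay-until-stuck scan,
--     # then spend one shield on the costliest wave seen so far (swap it out of
--     # the paid list if it is a past wave); with no shields left, one last scan.
--     m = len(enemys)
--     paid = []          # waves paid for so far (order irrelevant)
--     i = 0
--     while k >= 1:
--         while i < m and n >= enemys[i]:
--             n -= enemys[i]
--             paid.append(enemys[i])
--             i += 1
--         if i == m:
--             return m
--         e = enemys[i]
--         big = max(paid) if paid else e
--         if big > e:
--             paid.remove(big)
--             paid.append(e)
--             n += big - e
--         k -= 1
--         i += 1
--     while i < m and n >= enemys[i]:
--         n -= enemys[i]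
--         i += 1
--     return i
-- ===== Notes on version B (the rewrite author's own statement) =====
-- stated objective: alternative
-- what changed: Replaces A's single online loop with a per-round max-heap by a staged decomposition: an outer loop over remaining shields, each stage a plain pay-until-stuck scan followed by one max-of-list selection to swap the costliest wave out of the paid list; no heap or incremental max structure is kept.
import Mathlib
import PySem

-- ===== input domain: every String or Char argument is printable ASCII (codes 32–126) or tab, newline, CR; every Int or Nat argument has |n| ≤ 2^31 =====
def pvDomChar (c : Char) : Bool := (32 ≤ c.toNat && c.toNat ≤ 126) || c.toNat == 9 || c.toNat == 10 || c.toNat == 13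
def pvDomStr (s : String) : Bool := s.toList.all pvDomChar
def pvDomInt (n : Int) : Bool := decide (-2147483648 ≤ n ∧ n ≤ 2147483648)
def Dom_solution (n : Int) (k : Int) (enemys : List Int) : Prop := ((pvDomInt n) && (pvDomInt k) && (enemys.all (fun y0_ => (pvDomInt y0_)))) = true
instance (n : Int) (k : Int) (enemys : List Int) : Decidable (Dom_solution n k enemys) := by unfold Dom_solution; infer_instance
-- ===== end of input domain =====

-- B replaces A's single online loop with a max-heap by a staged decomposition:
-- an outer recursion over shields, each stage a pay-until-stuck scan plus one
-- max-of-list selection (objective: alternative, not faster).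

-- ===== PORT A =====
-- heapq is modelled as a bag: heappush = cons, heappop = (first) minimal value removed.
-- Exact for A's use, since only the popped minimum and the remaining multiset are ever observed.
def pvHeapPush (q : List Int) (x : Int) : List Int := x :: q

def pvHeapPop (q : List Int) : Int × List Int :=
  match PySem.List.min? q (fun x => x) with
  | some m => (m, q.erase m)
  | none => (0, q)    -- unreachable: A pops only right after a push

def pvGoA : List Int → Int → Int → List Int → Int
  | [], _, _, _ => 0
  | e :: rest, n, k, q =>
    if n ≥ e then 1 + pvGoA rest (n - e) k (pvHeapPush q (-e))
    else if k < 1 then 0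
    else
      let q1 := pvHeapPush q (-e)
      let p := pvHeapPop q1
      let num := -p.1
      1 + pvGoA rest (n - e + num) (k - 1) p.2

def solution (n : Int) (k : Int) (enemys : List Int) : Int := pvGoA enemys n k []

-- ===== PORT B =====
-- inner 'while i < m and n >= enemys[i]' loop with the paid accumulator:
-- returns (n', paid', remaining waves, rounds paid this stage)
def pvPayScan : List Int → Int → List Int → Int × List Int × List Int × Int
  | [], n, paid => (n, paid, [], 0)
  | e :: rest, n, paid =>
    if n ≥ e then
      let r := pvPayScan rest (n - e) (paid ++ [e])
      (r.1, r.2.1, r.2.2.1, r.2.2.2 + 1)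
    else (n, paid, e :: rest, 0)

-- the final 'while' loop of Source B (no shields left): pay while affordable, count rounds
def pvPayCount : List Int → Int → Int
  | [], _ => 0
  | e :: rest, n => if n ≥ e then 1 + pvPayCount rest (n - e) else 0

theorem pvPayScan_rest_len : ∀ (es : List Int) (n : Int) (paid : List Int),
    ((pvPayScan es n paid).2.2.1).length ≤ es.length := by
  intro es
  induction es with
  | nil => intro n paid; simp [pvPayScan]
  | cons e rest ih =>
    intro n paid
    simp only [pvPayScan]
    split_ifs
    · exact le_trans (ih (n - e) (paid ++ [e])) (by simp)
    · simp

-- outer 'while k >= 1' loop of Source B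
def pvGoB (es : List Int) (n k : Int) (paid : List Int) : Int :=
  if k ≥ 1 then
    match h : pvPayScan es n paid with
    | (_, _, [], c) => c
    | (n', paid', e :: rest', c) =>
      let big := (PySem.List.max? paid' (fun x => x)).getD e
      if big > e then c + 1 + pvGoB rest' (n' + big - e) (k - 1) (paid'.erase big ++ [e])
      else c + 1 + pvGoB rest' n' (k - 1) paid'
  else pvPayCount es n
termination_by es.length
decreasing_by
  all_goals
    have hlen := pvPayScan_rest_len es n paid
    rw [h] at hlen
    simp at hlen
    omega

def solution_alt (n : Int) (k : Int) (enemys : List Int) : Int := pvGoB enemys n k []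

-- ===== PRECONDITION & SPEC =====
def Spec_solution (n : Int) (k : Int) (enemys : List Int) (out : Int) : Prop := out = solution_alt n k enemys
instance (n : Int) (k : Int) (enemys : List Int) (out : Int) : Decidable (Spec_solution n k enemys out) := by unfold Spec_solution; infer_instance

-- ===== CLAIM (what is proved, stated in full; the proofs are below) =====
def Claim_equal_solution : Prop := ∀ (n : Int) (k : Int) (enemys : List Int), Dom_solution n k enemys → Spec_solution n k enemys (solution n k enemys)

-- ===== LEMMAS AND PROOFS =====

-- with no shields, A's loop is exactly the pay-while-affordable count
theorem pvGoA_no_shield : ∀ (es : List Int) (n k : Int) (q : List Int), k < 1 →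
    pvGoA es n k q = pvPayCount es n := by
  intro es
  induction es with
  | nil => intro n k q _; rfl
  | cons e rest ih =>
    intro n k q hk
    simp only [pvGoA, pvPayCount]
    split_ifs with h1
    · rw [ih (n - e) k _ hk]
    · rfl

-- unfolding pvGoB through a computed pvPayScan value
theorem pvGoB_eq (es : List Int) (n k : Int) (paid : List Int) (n' : Int)
    (paid' rest : List Int) (c : Int) (hk : k ≥ 1)
    (h : pvPayScan es n paid = (n', paid', rest, c)) :
    pvGoB es n k paid =
      (match rest with
      | [] => c
      | e :: rest' =>
        let big := (PySem.List.max? paid' (fun x => x)).getD e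
        if big > e then c + 1 + pvGoB rest' (n' + big - e) (k - 1) (paid'.erase big ++ [e])
        else c + 1 + pvGoB rest' n' (k - 1) paid') := by
  rw [pvGoB, if_pos hk]
  split
  · rename_i a b c2 heq
    rw [h] at heq
    simp only [Prod.mk.injEq] at heq
    obtain ⟨h1, h2, h3, h4⟩ := heq
    subst h1; subst h2; subst h4; subst h3
    rfl
  · rename_i a b e2 rest2 c2 heq
    rw [h] at heq
    simp only [Prod.mk.injEq] at heq
    obtain ⟨h1, h2, h3, h4⟩ := heq
    subst h1; subst h2; subst h4; subst h3
    rfl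

-- B's stage, one affordable wave at a time
theorem pvGoB_step_pay (e : Int) (es : List Int) (n k : Int) (paid : List Int)
    (hk : k ≥ 1) (he : n ≥ e) :
    pvGoB (e :: es) n k paid = 1 + pvGoB es (n - e) k (paid ++ [e]) := by
  rcases hr : pvPayScan es (n - e) (paid ++ [e]) with ⟨n', paid', rest', c⟩
  have hscan : pvPayScan (e :: es) n paid = (n', paid', rest', c + 1) := by
    simp [pvPayScan, if_pos he, hr]
  rw [pvGoB_eq (e :: es) n k paid n' paid' rest' (c + 1) hk hscan,
      pvGoB_eq es (n - e) k (paid ++ [e]) n' paid' rest' c hk hr]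
  cases rest' with
  | nil => ring
  | cons e2 rest2 =>
    simp only []
    split_ifs <;> ring

-- B's stage boundary: unaffordable wave, a shield is spent
theorem pvGoB_step_forced (e : Int) (es : List Int) (n k : Int) (paid : List Int)
    (hk : k ≥ 1) (he : ¬ n ≥ e) :
    pvGoB (e :: es) n k paid =
      (if (PySem.List.max? paid (fun x => x)).getD e > e then
        1 + pvGoB es (n + (PySem.List.max? paid (fun x => x)).getD e - e) (k - 1)
              (paid.erase ((PySem.List.max? paid (fun x => x)).getD e) ++ [e])
      else 1 + pvGoB es n (k - 1) paid) := by
  have hscan : pvPayScan (e :: es) n paid = (n, paid, e :: es, 0) := by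
    simp [pvPayScan, if_neg he]
  rw [pvGoB_eq (e :: es) n k paid n paid (e :: es) 0 hk hscan]
  simp only []
  split_ifs <;> ring

theorem pvGoB_no_shield (es : List Int) (n k : Int) (paid : List Int) (hk : ¬ k ≥ 1) :
    pvGoB es n k paid = pvPayCount es n := by
  rw [pvGoB, if_neg hk]

-- main lockstep lemma: A's heap and B's paid list describe the same multiset
theorem pv_goA_eq_goB : ∀ (es : List Int) (n k : Int) (q paid : List Int),
    ((q.map (fun x => -x) : List Int) : Multiset Int) = (paid : Multiset Int) →
    pvGoA es n k q = pvGoB es n k paid := by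
  intro es
  induction es with
  | nil =>
    intro n k q paid _
    by_cases hk : k ≥ 1
    · rw [pvGoB_eq [] n k paid n paid [] 0 hk rfl]; rfl
    · rw [pvGoB, if_neg hk]; rfl
  | cons e rest ih =>
    intro n k q paid hm
    have hmem : ∀ x : Int, x ∈ q ↔ -x ∈ paid := by
      intro x
      constructor
      · intro hx
        have h1 : -x ∈ (q.map (fun y => -y)) := List.mem_map.mpr ⟨x, hx, rfl⟩
        have h2 : -x ∈ ((q.map (fun y => -y) : List Int) : Multiset Int) := h1
        rw [hm] at h2
        exact h2
      · intro hx
        have h2 : -x ∈ ((paid : List Int) : Multiset Int) := hx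
        rw [← hm] at h2
        rcases List.mem_map.mp h2 with ⟨y, hy, hxy⟩
        have : y = x := by omega
        exact this ▸ hy
    by_cases h1 : n ≥ e
    · by_cases hk : k ≥ 1
      · rw [pvGoB_step_pay e rest n k paid hk h1]
        simp only [pvGoA, if_pos h1]
        congr 1
        apply ih
        show ((pvHeapPush q (-e)).map (fun x => -x) : Multiset Int) = _
        simp only [pvHeapPush, List.map_cons, neg_neg]
        have : ((paid ++ [e] : List Int) : Multiset Int) = e ::ₘ (paid : Multiset Int) := by
          have h3 : ((paid ++ [e] : List Int) : Multiset Int)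
              = (paid : Multiset Int) + ([e] : List Int) := by
            exact_mod_cast (Multiset.coe_add _ _).symm
          rw [h3, Multiset.coe_singleton, add_comm, Multiset.singleton_add]
        rw [this]
        exact congrArg (e ::ₘ ·) hm
      · have hk1 : k < 1 := by omega
        rw [pvGoB_no_shield _ _ _ _ hk]
        simp only [pvGoA, pvPayCount, if_pos h1]
        rw [pvGoA_no_shield rest (n - e) k _ hk1]
    · by_cases hk : k ≥ 1
      · have hk1 : ¬ k < 1 := by omega
        rw [pvGoB_step_forced e rest n k paid hk h1]
        simp only [pvGoA, if_neg h1, if_neg hk1]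
        -- A pops the minimum m₀ of -e :: q; -m₀ is the maximum of e :: paid (as multisets)
        obtain ⟨m₀, hm₀⟩ : ∃ m₀, PySem.List.min? (-e :: q) (fun x => x) = some m₀ := by
          cases hmin : PySem.List.min? (-e :: q) (fun x => x) with
          | none => exact absurd ((PySem.List.min?_eq_none_iff _ _).mp hmin) (by simp)
          | some m => exact ⟨m, rfl⟩
        have hm₀mem : m₀ ∈ -e :: q := PySem.List.min?_mem hm₀
        have hm₀min : ∀ y ∈ -e :: q, m₀ ≤ y := by
          intro y hy; exact PySem.List.min?_isMin hm₀ y hy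
        have hmem1 : ∀ x : Int, x ∈ (-e :: q) ↔ -x ∈ (e :: paid) := by
          intro x
          constructor
          · intro hx
            rcases List.mem_cons.mp hx with hx | hx
            · exact List.mem_cons.mpr (Or.inl (by omega))
            · exact List.mem_cons_of_mem _ ((hmem x).mp hx)
          · intro hx
            rcases List.mem_cons.mp hx with hx | hx
            · exact List.mem_cons.mpr (Or.inl (by omega))
            · exact List.mem_cons_of_mem _ ((hmem x).mpr hx)
        have hmax_mem : -m₀ ∈ (e :: paid) := (hmem1 m₀).mp hm₀mem
        have hmax : ∀ z ∈ (e :: paid), z ≤ -m₀ := by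
          intro z hz
          have hz2 : -z ∈ (-e :: q) := (hmem1 (-z)).mpr (by simpa using hz)
          have := hm₀min (-z) hz2
          omega
        simp only [pvHeapPop, pvHeapPush, hm₀]
        set big := (PySem.List.max? paid (fun x => x)).getD e with hbig
        by_cases h3 : big > e
        · -- paid is nonempty and its maximum big exceeds e: the popped value is big
          have hpaid_ne : paid ≠ [] := by
            intro hnil
            rw [hnil] at hbig
            simp [PySem.List.max?] at hbig
            omega
          obtain ⟨b₀, hb₀⟩ : ∃ b₀, PySem.List.max? paid (fun x => x) = some b₀ := by
            cases hb : PySem.List.max? paid (fun x => x) with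
            | none => exact absurd ((PySem.List.max?_eq_none_iff _ _).mp hb) hpaid_ne
            | some b => exact ⟨b, rfl⟩
          have hbigval : big = b₀ := by rw [hbig, hb₀]; rfl
          have hb₀mem : b₀ ∈ paid := PySem.List.max?_mem hb₀
          have hb₀max : ∀ y ∈ paid, y ≤ b₀ := fun y hy => PySem.List.max?_isMax hb₀ y hy
          have hm₀big : -m₀ = big := by
            have h4 : -m₀ ≤ big := by
              rcases List.mem_cons.mp hmax_mem with h | h
              · omega
              · rw [hbigval]; exact hb₀max _ h
            have h5 : big ≤ -m₀ := by
              rw [hbigval]; exact hmax b₀ (List.mem_cons_of_mem _ hb₀mem)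
            omega
          rw [if_pos h3]
          have harith : n - e + - m₀ = n + big - e := by omega
          rw [harith]
          congr 1
          apply ih
          have h6 : (((-e :: q).erase m₀).map (fun x => -x) : Multiset Int)
              = (((-e :: q).map (fun x => -x) : List Int) : Multiset Int).erase (-m₀) := by
            rw [List.map_erase (fun a b => by omega) (-e :: q)]
            rw [← Multiset.coe_erase]
          rw [h6]
          have h7 : (((-e :: q).map (fun x => -x) : List Int) : Multiset Int)
              = e ::ₘ (paid : Multiset Int) := by
            simp only [List.map_cons, neg_neg]
            exact congrArg (e ::ₘ ·) hm
          rw [h7, hm₀big]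
          have h8 : (e ::ₘ (paid : Multiset Int)).erase big
              = e ::ₘ ((paid : Multiset Int)).erase big := by
            exact Multiset.erase_cons_tail _ (by omega)
          rw [h8]
          have h9 : ((paid.erase big ++ [e] : List Int) : Multiset Int)
              = e ::ₘ ((paid.erase big : List Int) : Multiset Int) := by
            have h10 : ((paid.erase big ++ [e] : List Int) : Multiset Int)
                = ((paid.erase big : List Int) : Multiset Int) + ([e] : List Int) := by
              exact_mod_cast (Multiset.coe_add _ _).symm
            rw [h10, Multiset.coe_singleton, add_comm, Multiset.singleton_add]
          rw [h9, Multiset.coe_erase]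
        · -- e itself is the maximum: A pops the value e back out, nothing changes
          have hm₀e : m₀ = -e := by
            have h4 : -m₀ ≤ e := by
              rcases List.mem_cons.mp hmax_mem with h | h
              · omega
              · -- -m₀ ∈ paid, so -m₀ ≤ big ≤ e
                obtain ⟨b₀, hb₀⟩ : ∃ b₀, PySem.List.max? paid (fun x => x) = some b₀ := by
                  cases hb : PySem.List.max? paid (fun x => x) with
                  | none =>
                    rw [(PySem.List.max?_eq_none_iff _ _).mp hb] at h
                    cases h
                  | some b => exact ⟨b, rfl⟩
                have : -m₀ ≤ b₀ := PySem.List.max?_isMax hb₀ _ h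
                have hbigval : big = b₀ := by rw [hbig, hb₀]; rfl
                omega
            have h5 : e ≤ -m₀ := hmax e (by simp)
            omega
          rw [if_neg h3, hm₀e]
          have harith : n - e + - -e = n := by ring_nf
          rw [harith]
          have herase : (-e :: q).erase (-e) = q := by simp
          rw [herase]
          congr 1
          exact ih n (k - 1) q paid hm
      · have hk1 : k < 1 := by omega
        rw [pvGoB_no_shield _ _ _ _ hk]
        simp only [pvGoA, pvPayCount, if_neg h1, if_pos hk1]

-- ===== VERDICT (by name: the statement is the Claim_ definition above) =====
theorem solution_spec : Claim_equal_solution := by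
  intro n k enemys _
  show solution n k enemys = solution_alt n k enemys
  exact pv_goA_eq_goB enemys n k [] [] (by simp)
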